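-- pv_equiv track=rewrite | github.com/zweikern/ha-addons | household_tool/app/main.py | project_descendants
-- ===== SOURCE A (Python) =====
-- from collections import defaultdict
-- from typing import Any
--
-- def project_descendants(projects: list[Any], root_id: int) -> set[int]:
--     children: dict[int, list[int]] = defaultdict(list)
--     for row in projects:
--         pid = row['parent_id']
--         if pid is None:
--             continue
--         pid_i = int(pid)
--         cid_i = int(row['id'])
--         if pid_i != cid_i:
--             children[pid_i].append(cid_i)
--
--     result: set[int] = set()
--     stack = [root_id]
--     while stack:
--         current = stack.pop()
--         for cid in children.get(current, []):
--             if cid in result: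
--                 continue
--             result.add(cid)
--             stack.append(cid)
--     return result
-- ===== SOURCE B (Python) =====
-- def project_descendants(projects, root_id):
--     children: dict[int, list[int]] = {}
--     for row in projects:
--         pid = row['parent_id']
--         if pid is None:
--             continue
--         pid_i = int(pid)
--         cid_i = int(row['id'])
--         if pid_i != cid_i:
--             children.setdefault(pid_i, []).append(cid_i)
--
--     result: set[int] = set()
--
--     def dfs(node):
--         new = []
--         for cid in children.get(node, []):
--             if cid not in result:
--                 result.add(cid)
--                 new.append(cid)
--         for cid in reversed(new):
--             dfs(cid)
--
--     dfs(root_id)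
--     return result
-- ===== Notes on version B (the rewrite author's own statement) =====
-- stated objective: alternative
-- what changed: Replaces the explicit-stack while-loop traversal with a recursive depth-first helper sharing the visited set (and builds the adjacency map with dict.setdefault instead of collections.defaultdict).
import Mathlib
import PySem

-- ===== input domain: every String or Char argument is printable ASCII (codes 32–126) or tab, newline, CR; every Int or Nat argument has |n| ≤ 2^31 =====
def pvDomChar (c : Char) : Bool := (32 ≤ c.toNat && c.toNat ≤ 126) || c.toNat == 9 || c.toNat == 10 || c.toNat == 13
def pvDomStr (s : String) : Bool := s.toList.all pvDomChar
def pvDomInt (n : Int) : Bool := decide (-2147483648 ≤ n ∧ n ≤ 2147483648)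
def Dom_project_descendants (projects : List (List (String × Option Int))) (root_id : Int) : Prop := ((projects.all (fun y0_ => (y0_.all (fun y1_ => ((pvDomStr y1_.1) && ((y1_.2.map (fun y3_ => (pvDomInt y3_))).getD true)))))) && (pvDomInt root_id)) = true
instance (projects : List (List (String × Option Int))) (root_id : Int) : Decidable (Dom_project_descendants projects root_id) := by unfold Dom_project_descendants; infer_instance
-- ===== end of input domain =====

-- B replaces A's explicit-stack while-loop with a recursive depth-first helper over the same
-- adjacency map (built with setdefault instead of defaultdict); same cost, alternative decomposition.


-- ===== PORT A =====
-- one row of A's first loop: children[pid_i].append(cid_i) on a defaultdict(list)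
def pvBuildStepA (children : PySem.Dict Int (List Int)) (row : List (String × Option Int)) : PySem.Dict Int (List Int) :=
  match PySem.Dict.get? (PySem.Dict.mk row) "parent_id" with
  | none => children                        -- row['parent_id'] would raise KeyError: excluded by Pre_
  | some none => children                   -- pid is None: continue
  | some (some pid) =>
    match PySem.Dict.get? (PySem.Dict.mk row) "id" with
    | some (some cid) =>
        if pid ≠ cid then children.modify pid [] (· ++ [cid]) else children
    | _ => children                         -- row['id'] KeyError / int(None) TypeError: excluded by Pre_

-- body of A's inner for: skip seen children, mark and push the new ones (stack top at list head)
def pvPushA (rs : PySem.Set Int × List Int) (cid : Int) : PySem.Set Int × List Int :=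
  if rs.1.contains cid then rs else (PySem.Set.add rs.1 cid, cid :: rs.2)

-- termination measure for A's while loop: unmarked occurrences in the adjacency lists, plus stack size
def pvCountU (children : PySem.Dict Int (List Int)) (r : PySem.Set Int) : Nat :=
  ((children.values.flatten).filter (fun c => !(r.contains c))).length

lemma pv_getD_mem_flatten (children : PySem.Dict Int (List Int)) (k c : Int)
    (hc : c ∈ children.getD k []) : c ∈ children.values.flatten := by
  unfold PySem.Dict.getD PySem.Dict.get? at hc
  cases hfind : List.find? (fun p => p.1 == k) children.items with
  | none => simp [hfind] at hc
  | some p =>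
      simp only [hfind, Option.map_some, Option.getD_some] at hc
      have hp : p ∈ children.items := List.mem_of_find?_eq_some hfind
      exact List.mem_flatten.mpr ⟨p.2, List.mem_map.mpr ⟨p, hp, rfl⟩, hc⟩

lemma pv_countU_add_lt (children : PySem.Dict Int (List Int)) (r : PySem.Set Int) (c : Int)
    (hU : c ∈ children.values.flatten) (hc : r.contains c = false) :
    pvCountU children (PySem.Set.add r c) < pvCountU children r := by
  unfold pvCountU
  have hnot : c ∉ r := by simpa using hc
  rw [PySem.Set.add_of_not_mem hnot]
  have hfilter : (children.values.flatten).filter (fun x => !((r ++ [c] : List Int).contains x))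
      = ((children.values.flatten).filter (fun x => !(r.contains x))).filter (fun x => !(x == c)) := by
    rw [List.filter_filter]
    apply List.filter_congr
    intro x _
    by_cases hx : x = c <;> by_cases hxr : x ∈ r <;> simp [hx, hxr]
  rw [hfilter]
  have hcmem : c ∈ (children.values.flatten).filter (fun x => !(r.contains x)) := by
    rw [List.mem_filter]
    exact ⟨hU, by simp [hnot]⟩
  calc (((children.values.flatten).filter (fun x => !(r.contains x))).filter (fun x => !(x == c))).length
      < ((children.values.flatten).filter (fun x => !(r.contains x))).length := by
        apply List.length_filter_lt_length_iff_exists.mpr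
        exact ⟨c, hcmem, by simp⟩

lemma pv_pushA_bound (children : PySem.Dict Int (List Int)) :
    ∀ (cs : List Int) (r : PySem.Set Int) (st : List Int),
    (∀ c ∈ cs, c ∈ children.values.flatten) →
    pvCountU children (cs.foldl pvPushA (r, st)).1 + (cs.foldl pvPushA (r, st)).2.length
      ≤ pvCountU children r + st.length := by
  intro cs
  induction cs with
  | nil => intro r st _; simp
  | cons c cs ih =>
      intro r st hU
      simp only [List.foldl_cons]
      by_cases hc : r.contains c = true
      · have hred : pvPushA (r, st) c = (r, st) := by
          simp only [pvPushA, hc, reduceIte]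
        rw [hred]
        exact ih r st (fun x hx => hU x (List.mem_cons_of_mem _ hx))
      · have hc' : r.contains c = false := by simpa using hc
        have hred : pvPushA (r, st) c = (PySem.Set.add r c, c :: st) := by
          simp only [pvPushA, hc', Bool.false_eq_true, reduceIte]
        rw [hred]
        have h1 := ih (PySem.Set.add r c) (c :: st) (fun x hx => hU x (List.mem_cons_of_mem _ hx))
        have h2 := pv_countU_add_lt children r c (hU c (List.mem_cons_self)) hc'
        simp only [List.length_cons] at h1 ⊢
        omega

-- A's while loop: pop the top, mark-and-push its unseen children
def pvLoopA (children : PySem.Dict Int (List Int)) (r : PySem.Set Int) (stack : List Int) : PySem.Set Int :=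
  match stack with
  | [] => r
  | current :: rest =>
      let rs := (children.getD current []).foldl pvPushA (r, rest)
      pvLoopA children rs.1 rs.2
termination_by pvCountU children r + stack.length
decreasing_by
  have := pv_pushA_bound children (children.getD current []) r rest
    (fun c hc => pv_getD_mem_flatten children current c hc)
  simp only [List.length_cons]
  omega

def project_descendants (projects : List (List (String × Option Int))) (root_id : Int) : List Int :=
  pvLoopA (projects.foldl pvBuildStepA PySem.Dict.empty) PySem.Set.empty [root_id]

-- ===== PORT B =====
-- one row of B's first loop: children.setdefault(pid_i, []).append(cid_i)
def pvBuildStepB (children : PySem.Dict Int (List Int)) (row : List (String × Option Int)) : PySem.Dict Int (List Int) :=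
  match PySem.Dict.get? (PySem.Dict.mk row) "parent_id" with
  | none => children                        -- row['parent_id'] would raise KeyError: excluded by Pre_
  | some none => children                   -- pid is None: continue
  | some (some pid) =>
    match PySem.Dict.get? (PySem.Dict.mk row) "id" with
    | some (some cid) =>
        if pid ≠ cid then
          let d := children.setdefault pid []
          d.insert pid (d.getD pid [] ++ [cid])
        else children
    | _ => children                         -- row['id'] KeyError / int(None) TypeError: excluded by Pre_

-- body of B's first for inside dfs: mark unseen children, collecting them into `new` (in order)
def pvCollectB (rn : PySem.Set Int × List Int) (cid : Int) : PySem.Set Int × List Int :=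
  if rn.1.contains cid then rn else (PySem.Set.add rn.1 cid, rn.2 ++ [cid])

-- B's recursive dfs; the fuel argument only makes the recursion structural and is proved ample below
def pvDfsB (children : PySem.Dict Int (List Int)) : Nat → Int → PySem.Set Int → PySem.Set Int
  | 0, _, r => r
  | fuel + 1, node, r =>
      let rn := (children.getD node []).foldl pvCollectB (r, [])
      rn.2.reverse.foldl (fun acc cid => pvDfsB children fuel cid acc) rn.1

def project_descendants_alt (projects : List (List (String × Option Int))) (root_id : Int) : List Int :=
  let children := projects.foldl pvBuildStepB PySem.Dict.empty
  pvDfsB children (children.values.flatten.length + 1) root_id PySem.Set.empty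

-- ===== PRECONDITION & SPEC =====
-- Pre_ excludes exactly the rows on which Python A raises: a missing 'parent_id' key (KeyError),
-- and — when parent_id is a non-None int — a missing 'id' key (KeyError) or id = None (int(None) TypeError).
def pvRowOk (row : List (String × Option Int)) : Bool :=
  match PySem.Dict.get? (PySem.Dict.mk row) "parent_id" with
  | none => false
  | some none => true
  | some (some _) =>
    match PySem.Dict.get? (PySem.Dict.mk row) "id" with
    | some (some _) => true
    | _ => false

def Pre_project_descendants (projects : List (List (String × Option Int))) (root_id : Int) : Prop :=
  ∀ row ∈ projects, pvRowOk row = true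
instance (projects : List (List (String × Option Int))) (root_id : Int) : Decidable (Pre_project_descendants projects root_id) := by unfold Pre_project_descendants; infer_instance

def pvWitness_project_descendants : (List (List (String × Option Int))) × Int :=
  ([[("parent_id", some 1), ("id", some 2)], [("parent_id", some 2), ("id", some 3)]], 1)

def Spec_project_descendants (projects : List (List (String × Option Int))) (root_id : Int) (out : List Int) : Prop := out = project_descendants_alt projects root_id
instance (projects : List (List (String × Option Int))) (root_id : Int) (out : List Int) : Decidable (Spec_project_descendants projects root_id out) := by unfold Spec_project_descendants; infer_instance

-- ===== CLAIM (what is proved, stated in full; the proofs are below) =====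
def Claim_equal_project_descendants : Prop := ∀ (projects : List (List (String × Option Int))) (root_id : Int), Dom_project_descendants projects root_id → Pre_project_descendants projects root_id → Spec_project_descendants projects root_id (project_descendants projects root_id)

-- ===== LEMMAS AND PROOFS =====

-- the two adjacency builds agree row by row
lemma pv_build_step_eq (d : PySem.Dict Int (List Int)) (row : List (String × Option Int)) :
    pvBuildStepA d row = pvBuildStepB d row := by
  unfold pvBuildStepA pvBuildStepB
  cases PySem.Dict.get? (PySem.Dict.mk row) "parent_id" with
  | none => rfl
  | some pid? =>
    cases pid? with
    | none => rfl
    | some pid =>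
      cases PySem.Dict.get? (PySem.Dict.mk row) "id" with
      | none => rfl
      | some cid? =>
        cases cid? with
        | none => rfl
        | some cid =>
          by_cases hne : pid ≠ cid
          · simp only [if_pos hne]
            by_cases hc : d.contains pid = true
            · rw [PySem.Dict.setdefault_of_contains _ _ hc]; rfl
            · have hc' : d.contains pid = false := by simpa using hc
              rw [PySem.Dict.setdefault_of_not_contains _ _ hc']
              rw [PySem.Dict.getD_insert_self, PySem.Dict.insert_insert_self]
              unfold PySem.Dict.modify
              rw [PySem.Dict.getD_of_not_contains _ _ hc']
          · simp [if_neg hne]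

lemma pv_build_eq (projects : List (List (String × Option Int))) :
    projects.foldl pvBuildStepA PySem.Dict.empty = projects.foldl pvBuildStepB PySem.Dict.empty := by
  apply List.foldl_ext
  intro d row _
  exact pv_build_step_eq d row

-- A's push fold is B's collect fold with the new children reversed onto the old stack
lemma pv_collect_push (cs : List Int) (r : PySem.Set Int) (n st : List Int) :
    cs.foldl pvPushA (r, n.reverse ++ st)
      = ((cs.foldl pvCollectB (r, n)).1, (cs.foldl pvCollectB (r, n)).2.reverse ++ st) := by
  induction cs generalizing r n with
  | nil => simp
  | cons c cs ih =>
      simp only [List.foldl_cons]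
      by_cases hc : r.contains c = true
      · have hredp : pvPushA (r, n.reverse ++ st) c = (r, n.reverse ++ st) := by
          simp only [pvPushA, hc, reduceIte]
        have hredc : pvCollectB (r, n) c = (r, n) := by
          simp only [pvCollectB, hc, reduceIte]
        rw [hredp, hredc]
        exact ih r n
      · have hc' : r.contains c = false := by simpa using hc
        have hred1 : pvPushA (r, n.reverse ++ st) c = (PySem.Set.add r c, c :: (n.reverse ++ st)) := by
          simp only [pvPushA, hc', Bool.false_eq_true, reduceIte]
        have hred2 : pvCollectB (r, n) c = (PySem.Set.add r c, n ++ [c]) := by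
          simp only [pvCollectB, hc', Bool.false_eq_true, reduceIte]
        rw [hred1, hred2]
        have : c :: (n.reverse ++ st) = (n ++ [c]).reverse ++ st := by simp
        rw [this]
        exact ih (PySem.Set.add r c) (n ++ [c])

-- the collect fold appends to `new`; if nothing was appended the set is unchanged
lemma pv_collect_extend (cs : List Int) (r : PySem.Set Int) (n : List Int) :
    ∃ t, (cs.foldl pvCollectB (r, n)).2 = n ++ t
      ∧ (t = [] → (cs.foldl pvCollectB (r, n)).1 = r) := by
  induction cs generalizing r n with
  | nil => exact ⟨[], by simp⟩
  | cons c cs ih =>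
      simp only [List.foldl_cons]
      by_cases hc : r.contains c = true
      · have hred : pvCollectB (r, n) c = (r, n) := by
          simp only [pvCollectB, hc, reduceIte]
        rw [hred]
        exact ih r n
      · have hc' : r.contains c = false := by simpa using hc
        have hred : pvCollectB (r, n) c = (PySem.Set.add r c, n ++ [c]) := by
          simp only [pvCollectB, hc', Bool.false_eq_true, reduceIte]
        rw [hred]
        obtain ⟨t, ht, _⟩ := ih (PySem.Set.add r c) (n ++ [c])
        exact ⟨[c] ++ t, by simpa using ht, by simp⟩

lemma pv_collect_fst_subset (cs : List Int) (r : PySem.Set Int) (n : List Int) :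
    r ⊆ (cs.foldl pvCollectB (r, n)).1 := by
  induction cs generalizing r n with
  | nil => simp
  | cons c cs ih =>
      simp only [List.foldl_cons]
      by_cases hc : r.contains c = true
      · have hred : pvCollectB (r, n) c = (r, n) := by
          simp only [pvCollectB, hc, reduceIte]
        rw [hred]
        exact ih r n
      · have hc' : r.contains c = false := by simpa using hc
        have hred : pvCollectB (r, n) c = (PySem.Set.add r c, n ++ [c]) := by
          simp only [pvCollectB, hc', Bool.false_eq_true, reduceIte]
        rw [hred]
        refine List.Subset.trans ?_ (ih (PySem.Set.add r c) (n ++ [c]))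
        unfold PySem.Set.add
        split <;> simp

lemma pv_dfs_subset (children : PySem.Dict Int (List Int)) :
    ∀ (f : Nat) (node : Int) (r : PySem.Set Int), r ⊆ pvDfsB children f node r := by
  intro f
  induction f with
  | zero => intro node r; simp [pvDfsB]
  | succ f ihf =>
      intro node r
      simp only [pvDfsB]
      refine List.Subset.trans (pv_collect_fst_subset (children.getD node []) r []) ?_
      generalize ((children.getD node []).foldl pvCollectB (r, [])).2.reverse = ns
      generalize ((children.getD node []).foldl pvCollectB (r, [])).1 = r'
      induction ns generalizing r' with
      | nil => simp
      | cons m ms ihm =>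
          simp only [List.foldl_cons]
          exact List.Subset.trans (ihf m r') (ihm _)

lemma pv_countU_anti (children : PySem.Dict Int (List Int)) (r r' : PySem.Set Int)
    (h : r ⊆ r') : pvCountU children r' ≤ pvCountU children r := by
  unfold pvCountU
  have hmono : ∀ a ∈ children.values.flatten,
      (!(r'.contains a)) = true → (!(r.contains a)) = true := by
    intro x _ hx
    have hx' : x ∉ r' := by simpa using hx
    have hxr : x ∉ r := fun hm => hx' (h hm)
    simpa using hxr
  simpa [List.countP_eq_length_filter] using List.countP_mono_left hmono

-- the central bridge: running A's stack loop on s1 ++ s2 first drains s1 exactly as B's dfs does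
lemma pv_bridge (children : PySem.Dict Int (List Int)) :
    ∀ (k : Nat) (s1 : List Int) (r : PySem.Set Int) (f : Nat) (s2 : List Int),
    pvCountU children r ≤ k → pvCountU children r < f →
    pvLoopA children r (s1 ++ s2)
      = pvLoopA children (s1.foldl (fun acc cid => pvDfsB children f cid acc) r) s2 := by
  intro k
  induction k using Nat.strong_induction_on with
  | _ k IHk =>
    intro s1
    induction s1 with
    | nil => intro r f s2 _ _; rfl
    | cons node s1' IHs =>
      intro r f s2 hk hf
      obtain ⟨g, rfl⟩ : ∃ g, f = g + 1 := ⟨f - 1, by omega⟩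
      have hstep : pvLoopA children r ((node :: s1') ++ s2)
          = pvLoopA children ((children.getD node []).foldl pvPushA (r, s1' ++ s2)).1
              ((children.getD node []).foldl pvPushA (r, s1' ++ s2)).2 := by
        rw [pvLoopA.eq_def]
        rfl
      set cs := children.getD node [] with hcs
      set r' := (cs.foldl pvCollectB (r, [])).1 with hr'
      set new := (cs.foldl pvCollectB (r, [])).2 with hnew
      have hpush : cs.foldl pvPushA (r, s1' ++ s2) = (r', new.reverse ++ (s1' ++ s2)) := by
        have := pv_collect_push cs r [] (s1' ++ s2)
        simpa using this
      have hdfs : pvDfsB children (g + 1) node r = new.reverse.foldl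
          (fun acc cid => pvDfsB children g cid acc) r' := rfl
      have hcsU : ∀ c ∈ cs, c ∈ children.values.flatten :=
        fun c hc => pv_getD_mem_flatten children node c hc
      have hbound : pvCountU children r' + new.length ≤ pvCountU children r := by
        have h0 := pv_pushA_bound children cs r [] hcsU
        have h1 := pv_collect_push cs r [] []
        simp only [List.reverse_nil, List.append_nil] at h1
        rw [h1] at h0
        simpa using h0
      by_cases hnil : new = []
      · -- nothing new discovered: the set is unchanged and dfs does nothing
        obtain ⟨t, ht, htr⟩ := pv_collect_extend cs r []
        rw [← hnew] at ht
        have htnil : t = [] := by simpa [hnil] using ht.symm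
        have hr'r : r' = r := by rw [hr']; exact htr htnil
        rw [hstep, hpush, hnil, hr'r]
        simp only [List.reverse_nil, List.nil_append, List.foldl_cons]
        rw [hdfs, hnil, hr'r]
        simp only [List.reverse_nil, List.foldl_nil]
        exact IHs r (g + 1) s2 hk hf
      · have hlen : 0 < new.length := List.length_pos_of_ne_nil hnil
        have hlt : pvCountU children r' < pvCountU children r := by omega
        have h1 : pvLoopA children r' (new.reverse ++ (s1' ++ s2))
            = pvLoopA children (new.reverse.foldl (fun acc cid => pvDfsB children g cid acc) r')
                (s1' ++ s2) :=
          IHk (pvCountU children r') (by omega) new.reverse r' g (s1' ++ s2) le_rfl (by omega)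
        rw [hstep, hpush, h1, ← hdfs]
        have hsub : r ⊆ pvDfsB children (g + 1) node r := pv_dfs_subset children (g + 1) node r
        have hanti := pv_countU_anti children r _ hsub
        have := IHs (pvDfsB children (g + 1) node r) (g + 1) s2 (by omega) (by omega)
        rw [this]
        simp only [List.foldl_cons]

lemma pv_equiv (projects : List (List (String × Option Int))) (root_id : Int) :
    project_descendants projects root_id = project_descendants_alt projects root_id := by
  unfold project_descendants project_descendants_alt
  rw [pv_build_eq]
  set C := projects.foldl pvBuildStepB PySem.Dict.empty with hC
  have hcnt : pvCountU C PySem.Set.empty ≤ C.values.flatten.length := by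
    unfold pvCountU
    exact List.length_filter_le _ _
  have h := pv_bridge C (pvCountU C PySem.Set.empty) [root_id] PySem.Set.empty
    (C.values.flatten.length + 1) [] le_rfl (by omega)
  simp only [List.foldl_cons, List.foldl_nil] at h
  rw [List.singleton_append] at h
  rw [h, pvLoopA.eq_def]

-- ===== VERDICT (by name: the statement is the Claim_ definition above) =====
theorem project_descendants_spec : Claim_equal_project_descendants := by
  intro projects root_id _ _
  unfold Spec_project_descendants
  exact pv_equiv projects root_id
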